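-- pv_equiv track=rewrite | github.com/little-leiry/CuPerFuzzer | critical_path.py | isMeaningfulCase
-- ===== SOURCE A (Python) =====
-- def isMeaningfulCase(op_seq, seed_mode):
--     if op_seq[0] != '1': # rule 1
--         return False
--     app_num = 0
--     for i in range(len(op_seq)):
--         if op_seq[i] == '1':
--             app_num = 1
--         elif op_seq[i] == '2': # rule 2
--             if app_num == 0:
--                 return False
--             app_num = 0
--         elif op_seq[i] == '4': # rule 3
--             if i+1 < len(op_seq):
--                 if op_seq[i+1] == '4':
--                     return False
--     if app_num == 0 and seed_mode == 'single-app': # rule 4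
--         return False
--     return True
-- ===== SOURCE B (Python) =====
-- def isMeaningfulCase(op_seq, seed_mode):
--     if op_seq[0] != '1':  # rule 1
--         return False
--     # rule 3: no two consecutive '4's, in one pairwise pass
--     for a, b in zip(op_seq, op_seq[1:]):
--         if a == '4' and b == '4':
--             return False
--     # rule 2: every '2' must be preceded by an unmatched '1'
--     open_app = False
--     for op in op_seq:
--         if op == '1':
--             open_app = True
--         elif op == '2':
--             if not open_app:
--                 return False
--             open_app = False
--     # rule 4
--     if not open_app and seed_mode == 'single-app':
--         return False
--     return True
-- ===== Notes on version B (the rewrite author's own statement) =====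
-- stated objective: simpler
-- what changed: A's single fused index loop with lookahead and an int app_num counter is split into two independent list passes: a pairwise zip pass for the consecutive-'4' rule and a boolean-flag pass for the 1/2 pairing rule, removing all index arithmetic.
import Mathlib
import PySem

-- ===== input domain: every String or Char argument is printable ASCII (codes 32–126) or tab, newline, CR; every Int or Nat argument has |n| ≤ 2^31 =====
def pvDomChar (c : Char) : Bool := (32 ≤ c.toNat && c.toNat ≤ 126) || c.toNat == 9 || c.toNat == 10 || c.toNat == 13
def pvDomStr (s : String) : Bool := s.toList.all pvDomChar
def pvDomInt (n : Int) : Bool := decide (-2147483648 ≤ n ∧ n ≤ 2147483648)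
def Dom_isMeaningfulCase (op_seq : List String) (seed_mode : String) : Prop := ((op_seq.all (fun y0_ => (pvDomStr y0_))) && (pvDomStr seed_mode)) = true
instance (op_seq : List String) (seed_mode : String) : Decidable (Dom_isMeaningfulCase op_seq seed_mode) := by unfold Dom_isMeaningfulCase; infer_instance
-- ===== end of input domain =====

-- B splits A's single fused index loop into two independent list passes (a pairwise
-- zip pass for the consecutive-'4' rule, a boolean-flag pass for the 1/2 pairing);
-- objective: simpler. Pre_ excludes only the empty op_seq, on which A raises IndexError.

-- ===== PORT A =====
-- A's for-loop over range(len(op_seq)) with lookahead op_seq[i+1]: the lookahead at i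
-- is exactly the head of the remaining list, so the index loop is transcribed as this
-- structural recursion carrying the same app_num state and the same branch order.
def pvALoop : List String → Int → Option Int
  | [], app_num => some app_num
  | op :: rest, app_num =>
    if op = "1" then pvALoop rest 1
    else if op = "2" then
      (if app_num = 0 then none else pvALoop rest 0)
    else if op = "4" then
      (match rest with
       | next :: _ => if next = "4" then none else pvALoop rest app_num
       | [] => pvALoop rest app_num)
    else pvALoop rest app_num

def isMeaningfulCase (op_seq : List String) (seed_mode : String) : Bool :=
  match PySem.List.pyGet? op_seq 0 with
  | none => false  -- unreachable: Pre_ requires op_seq ≠ [] (Python raises IndexError)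
  | some h0 =>
    if h0 ≠ "1" then false
    else
      match pvALoop op_seq 0 with
      | none => false
      | some app_num => if app_num = 0 ∧ seed_mode = "single-app" then false else true

-- ===== PORT B =====
-- pass 1 of Source B: for a, b in zip(op_seq, op_seq[1:]) — true iff no adjacent "4","4"
def pvPairPass : List (String × String) → Bool
  | [] => true
  | (a, b) :: rest => if a = "4" ∧ b = "4" then false else pvPairPass rest

-- pass 2 of Source B: the 1/2 pairing flag; none = early False return
def pvFlagPass : List String → Bool → Option Bool
  | [], flag => some flag
  | op :: rest, flag =>
    if op = "1" then pvFlagPass rest true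
    else if op = "2" then (if ¬ flag then none else pvFlagPass rest false)
    else pvFlagPass rest flag

def isMeaningfulCase_alt (op_seq : List String) (seed_mode : String) : Bool :=
  match PySem.List.pyGet? op_seq 0 with
  | none => false  -- unreachable under Pre_: op_seq[0] raises IndexError in Python
  | some h0 =>
    if h0 ≠ "1" then false
    else if ¬ pvPairPass (op_seq.zip op_seq.tail) then false
    else
      match pvFlagPass op_seq false with
      | none => false
      | some flag => if ¬ flag ∧ seed_mode = "single-app" then false else true

-- ===== PRECONDITION & SPEC =====
-- Pre_ excludes exactly the empty op_seq: there A (and B) raise IndexError on op_seq[0].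
def Pre_isMeaningfulCase (op_seq : List String) (seed_mode : String) : Prop := op_seq ≠ []
instance (op_seq : List String) (seed_mode : String) : Decidable (Pre_isMeaningfulCase op_seq seed_mode) := by unfold Pre_isMeaningfulCase; infer_instance

def pvWitness_isMeaningfulCase : List String × String := (["1", "2"], "multi-app")

def Spec_isMeaningfulCase (op_seq : List String) (seed_mode : String) (out : Bool) : Prop := out = isMeaningfulCase_alt op_seq seed_mode
instance (op_seq : List String) (seed_mode : String) (out : Bool) : Decidable (Spec_isMeaningfulCase op_seq seed_mode out) := by unfold Spec_isMeaningfulCase; infer_instance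

-- ===== CLAIM (what is proved, stated in full; the proofs are below) =====
def Claim_equal_isMeaningfulCase : Prop := ∀ (op_seq : List String) (seed_mode : String), Dom_isMeaningfulCase op_seq seed_mode → Pre_isMeaningfulCase op_seq seed_mode → Spec_isMeaningfulCase op_seq seed_mode (isMeaningfulCase op_seq seed_mode)

-- ===== LEMMAS AND PROOFS =====

-- Loop fusion invariant: A's fused loop on a suffix equals B's two passes on that
-- suffix, with app_num = 1 ⟷ flag = true (both early-False results collapse to none).
theorem pvALoop_eq (l : List String) (flag : Bool) :
    pvALoop l (if flag then 1 else 0) =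
      (if pvPairPass (l.zip l.tail) then
        (pvFlagPass l flag).map (fun f => if f then (1 : Int) else 0)
       else none) := by
  induction l generalizing flag with
  | nil => simp [pvALoop, pvPairPass, pvFlagPass]
  | cons op rest ih =>
    cases rest with
    | nil =>
      by_cases h1 : op = "1" <;> by_cases h2 : op = "2" <;>
        simp_all [pvALoop, pvPairPass, pvFlagPass] <;> cases flag <;> simp_all
    | cons r rs =>
      by_cases h1 : op = "1"
      · have := ih true
        simp_all [pvALoop, pvPairPass, pvFlagPass]
      · by_cases h2 : op = "2"
        · cases flag
          · simp_all [pvALoop, pvPairPass, pvFlagPass]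
          · have := ih false
            simp_all [pvALoop, pvPairPass, pvFlagPass]
        · by_cases h4 : op = "4"
          · by_cases hr : r = "4"
            · simp_all [pvALoop, pvPairPass, pvFlagPass]
            · have := ih flag
              simp_all [pvALoop, pvPairPass, pvFlagPass]
          · have := ih flag
            simp_all [pvALoop, pvPairPass, pvFlagPass]

-- ===== VERDICT (by name: the statement is the Claim_ definition above) =====
theorem isMeaningfulCase_spec : Claim_equal_isMeaningfulCase := by
  unfold Claim_equal_isMeaningfulCase
  intro op_seq seed_mode _ hpre
  unfold Spec_isMeaningfulCase isMeaningfulCase isMeaningfulCase_alt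
  cases op_seq with
  | nil => exact absurd rfl hpre
  | cons h0 rest =>
    have hget : PySem.List.pyGet? (h0 :: rest) 0 = some h0 := by
      simp [PySem.List.pyGet?, PySem.List.pyIdx?]
    rw [hget]
    by_cases hh : h0 = "1"
    · subst hh
      have hfuse := pvALoop_eq ("1" :: rest) false
      simp only [Bool.false_eq_true, if_false] at hfuse
      rw [hfuse]
      simp only [List.tail_cons]
      by_cases hp : pvPairPass (("1" :: rest).zip rest) = true
      · cases hfp : pvFlagPass ("1" :: rest) false with
        | none => simp [hp, hfp]
        | some f => cases f <;> simp [hp, hfp]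
      · simp [hp]
    · simp [hh]
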